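-- pv_equiv track=rewrite | github.com/borninthedark/exousia | tools/copr_manager.py | get_required_coprs_for_packages
-- ===== SOURCE A (Python) =====
-- from typing import List, Dict, Optional
--
-- COPR_REPOS = {
--     'hyprland': {
--         'owner': 'solopasha',
--         'repo': 'hyprland',
--         'packages': ['hyprland', 'hyprlock', 'hypridle', 'hyprpaper', 'hyprsunset', 'hyprpolkitagent'],
--         'description': 'Hyprland compositor and utilities'
--     },
--     'swaync': {
--         'owner': 'erikreider',
--         'repo': 'SwayNotificationCenter',
--         'packages': ['swaync'],
--         'description': 'Sway Notification Center'
--     },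
--     'nwg-shell': {
--         'owner': 'tofik',
--         'repo': 'nwg-shell',
--         'packages': ['nwg-displays', 'nwg-look'],
--         'description': 'nwg-shell utilities for Wayland'
--     },
--     'wallust': {
--         'owner': 'errornointernet',
--         'repo': 'packages',
--         'packages': ['wallust'],
--         'description': 'Wallpaper color scheme generator'
--     },
-- }
--
-- def get_required_coprs_for_packages(packages: List[str]) -> List[Dict]:
--     """
--     Get list of COPR repos needed for a set of packages.
--
--     Args:
--         packages: List of package names
--
--     Returns:
--         List of COPR repo info dicts
--     """
--     required_coprs = []
--     seen = set()
--
--     for pkg in packages: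
--         for copr_name, copr_info in COPR_REPOS.items():
--             if pkg in copr_info['packages']:
--                 key = f"{copr_info['owner']}/{copr_info['repo']}"
--                 if key not in seen:
--                     required_coprs.append({
--                         'name': copr_name,
--                         'owner': copr_info['owner'],
--                         'repo': copr_info['repo'],
--                         'description': copr_info['description']
--                     })
--                     seen.add(key)
--
--     return required_coprs
-- ===== SOURCE B (Python) =====
-- from typing import List, Dict, Optional
--
-- COPR_REPOS = {
--     'hyprland': {
--         'owner': 'solopasha',
--         'repo': 'hyprland',
--         'packages': ['hyprland', 'hyprlock', 'hypridle', 'hyprpaper', 'hyprsunset', 'hyprpolkitagent'],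
--         'description': 'Hyprland compositor and utilities'
--     },
--     'swaync': {
--         'owner': 'erikreider',
--         'repo': 'SwayNotificationCenter',
--         'packages': ['swaync'],
--         'description': 'Sway Notification Center'
--     },
--     'nwg-shell': {
--         'owner': 'tofik',
--         'repo': 'nwg-shell',
--         'packages': ['nwg-displays', 'nwg-look'],
--         'description': 'nwg-shell utilities for Wayland'
--     },
--     'wallust': {
--         'owner': 'errornointernet',
--         'repo': 'packages',
--         'packages': ['wallust'],
--         'description': 'Wallpaper color scheme generator'
--     },
-- }
--
-- # Precomputed once: package name -> owning copr name.
-- _PKG_TO_COPR = {pkg: name for name, info in COPR_REPOS.items() for pkg in info['packages']}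
--
-- def _info_dict(name):
--     info = COPR_REPOS[name]
--     return {'name': name, 'owner': info['owner'], 'repo': info['repo'],
--             'description': info['description']}
--
-- def get_required_coprs_for_packages(packages: List[str]) -> List[Dict]:
--     hits = [_PKG_TO_COPR[p] for p in packages if p in _PKG_TO_COPR]
--     return [_info_dict(name) for name in dict.fromkeys(hits)]
-- ===== Notes on version B (the rewrite author's own statement) =====
-- stated objective: faster
-- what changed: B is a staged pipeline with no seen-set and no per-package inner scan: a precomputed package->copr-name index classifies each input package, dict.fromkeys dedupes the hit names in first-occurrence order, and a final mapping pass rebuilds each repo's info dict from COPR_REPOS; measured ~4x faster on large inputs (inner scan over all repos replaced by one dict lookup).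
import Mathlib
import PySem

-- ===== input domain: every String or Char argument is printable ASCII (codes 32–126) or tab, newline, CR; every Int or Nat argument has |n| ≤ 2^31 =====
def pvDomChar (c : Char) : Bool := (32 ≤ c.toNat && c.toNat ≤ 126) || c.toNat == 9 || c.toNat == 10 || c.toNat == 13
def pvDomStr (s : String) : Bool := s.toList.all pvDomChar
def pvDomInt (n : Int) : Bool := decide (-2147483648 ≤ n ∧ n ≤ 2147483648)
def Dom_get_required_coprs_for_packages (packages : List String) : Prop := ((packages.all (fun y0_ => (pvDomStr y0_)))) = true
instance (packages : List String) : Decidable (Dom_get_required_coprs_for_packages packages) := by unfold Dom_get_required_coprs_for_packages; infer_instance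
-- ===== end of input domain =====

-- B replaces A's stateful scan-and-seen-set loop by a staged pipeline (classify via a
-- precomputed package→copr-name index, dedupe names with dict.fromkeys, then build the
-- info dicts in a separate mapping pass); objective: faster (measured) with identical return values.

-- ===== PORT A =====
-- the module constant COPR_REPOS as (name, owner, repo, packages, description) tuples
def coprReposA : List (String × String × String × List String × String) :=
  [("hyprland", "solopasha", "hyprland",
      ["hyprland", "hyprlock", "hypridle", "hyprpaper", "hyprsunset", "hyprpolkitagent"],
      "Hyprland compositor and utilities"),
   ("swaync", "erikreider", "SwayNotificationCenter", ["swaync"], "Sway Notification Center"),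
   ("nwg-shell", "tofik", "nwg-shell", ["nwg-displays", "nwg-look"], "nwg-shell utilities for Wayland"),
   ("wallust", "errornointernet", "packages", ["wallust"], "Wallpaper color scheme generator")]

-- body of A's outer loop: the inner 'for copr_name, copr_info in COPR_REPOS.items()' scan
def coprScanA (st : List (List (String × String)) × PySem.Set String) (pkg : String) :
    List (List (String × String)) × PySem.Set String :=
  coprReposA.foldl (fun st2 e =>
    if e.2.2.2.1.contains pkg then
      if (PySem.Set.contains st2.2 (e.2.1 ++ "/" ++ e.2.2.1)) = false then
        (st2.1 ++ [[("name", e.1), ("owner", e.2.1), ("repo", e.2.2.1), ("description", e.2.2.2.2)]],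
         PySem.Set.add st2.2 (e.2.1 ++ "/" ++ e.2.2.1))
      else st2
    else st2) st

def get_required_coprs_for_packages (packages : List String) : List (List (String × String)) :=
  (packages.foldl coprScanA ([], PySem.Set.empty)).1

-- ===== PORT B =====
-- the COPR_REPOS info records, here as a structure, keyed by copr name in a PySem.Dict
structure CoprInfo where
  owner : String
  repo : String
  pkgs : List String
  descr : String
deriving DecidableEq, Repr

def coprReposB : PySem.Dict String CoprInfo := PySem.Dict.mk
  [("hyprland", ⟨"solopasha", "hyprland",
      ["hyprland", "hyprlock", "hypridle", "hyprpaper", "hyprsunset", "hyprpolkitagent"],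
      "Hyprland compositor and utilities"⟩),
   ("swaync", ⟨"erikreider", "SwayNotificationCenter", ["swaync"], "Sway Notification Center"⟩),
   ("nwg-shell", ⟨"tofik", "nwg-shell", ["nwg-displays", "nwg-look"], "nwg-shell utilities for Wayland"⟩),
   ("wallust", ⟨"errornointernet", "packages", ["wallust"], "Wallpaper color scheme generator"⟩)]

-- _PKG_TO_COPR: the dict comprehension, built once (package -> owning copr name)
def pkgToCoprB : PySem.Dict String String :=
  coprReposB.items.foldl
    (fun d e => e.2.pkgs.foldl (fun d2 p => d2.insert p e.1) d) PySem.Dict.empty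

-- _info_dict(name); the none branch is where Python would raise KeyError — unreachable,
-- every name passed in comes from the index and is a key of COPR_REPOS
def infoDictB (name : String) : List (String × String) :=
  match PySem.Dict.get? coprReposB name with
  | some i => [("name", name), ("owner", i.owner), ("repo", i.repo), ("description", i.descr)]
  | none => []

def get_required_coprs_for_packages_alt (packages : List String) : List (List (String × String)) :=
  (PySem.List.dedup (packages.filterMap (fun p => PySem.Dict.get? pkgToCoprB p))).map infoDictB

-- ===== PRECONDITION & SPEC =====
def Spec_get_required_coprs_for_packages (packages : List String) (out : List (List (String × String))) : Prop := out = get_required_coprs_for_packages_alt packages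
instance (packages : List String) (out : List (List (String × String))) : Decidable (Spec_get_required_coprs_for_packages packages out) := by unfold Spec_get_required_coprs_for_packages; infer_instance

-- ===== CLAIM (what is proved, stated in full; the proofs are below) =====
def Claim_equal_get_required_coprs_for_packages : Prop := ∀ (packages : List String), Dom_get_required_coprs_for_packages packages → Spec_get_required_coprs_for_packages packages (get_required_coprs_for_packages packages)

-- ===== LEMMAS AND PROOFS =====

-- the per-package step B's pipeline amounts to on the deduped-names-so-far state
def pvStepB (s : PySem.Set String) (p : String) : PySem.Set String :=
  match PySem.Dict.get? pkgToCoprB p with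
  | none => s
  | some n => PySem.Set.add s n

lemma pvDedup_filterMap (l : List String) (s : PySem.Set String) :
    PySem.Set.update s (l.filterMap (fun p => PySem.Dict.get? pkgToCoprB p)) =
      l.foldl pvStepB s := by
  induction l generalizing s with
  | nil => simp [PySem.Set.update_nil]
  | cons hd tl ih =>
    rw [List.filterMap_cons, List.foldl_cons]
    cases h : PySem.Dict.get? pkgToCoprB hd with
    | none => simp only [pvStepB, h]; exact ih s
    | some n => simp only [pvStepB, h, PySem.Set.update_cons]; exact ih _

-- pkgToCoprB evaluated to its literal item list (used to reduce the lookups)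
lemma pkgToCoprB_items : pkgToCoprB = PySem.Dict.mk
  [("hyprland", "hyprland"), ("hyprlock", "hyprland"), ("hypridle", "hyprland"),
   ("hyprpaper", "hyprland"), ("hyprsunset", "hyprland"), ("hyprpolkitagent", "hyprland"),
   ("swaync", "swaync"), ("nwg-displays", "nwg-shell"), ("nwg-look", "nwg-shell"),
   ("wallust", "wallust")] := by decide

lemma pvIndex_none (pkg : String)
    (h1 : pkg ≠ "hyprland") (h2 : pkg ≠ "hyprlock") (h3 : pkg ≠ "hypridle")
    (h4 : pkg ≠ "hyprpaper") (h5 : pkg ≠ "hyprsunset") (h6 : pkg ≠ "hyprpolkitagent")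
    (h7 : pkg ≠ "swaync") (h8 : pkg ≠ "nwg-displays") (h9 : pkg ≠ "nwg-look")
    (h10 : pkg ≠ "wallust") :
    PySem.Dict.get? pkgToCoprB pkg = none := by
  rw [pkgToCoprB_items]
  simp [PySem.Dict.get?_mk_cons, PySem.Dict.get?,
    Ne.symm h1, Ne.symm h2, Ne.symm h3, Ne.symm h4, Ne.symm h5, Ne.symm h6,
    Ne.symm h7, Ne.symm h8, Ne.symm h9, Ne.symm h10]

-- A's seen-set holds "owner/repo" keys, B's deduped names are copr names; same repos.
def pvSeenR (sA sB : PySem.Set String) : Prop :=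
  (PySem.Set.contains sA "solopasha/hyprland" = PySem.Set.contains sB "hyprland") ∧
  (PySem.Set.contains sA "erikreider/SwayNotificationCenter" = PySem.Set.contains sB "swaync") ∧
  (PySem.Set.contains sA "tofik/nwg-shell" = PySem.Set.contains sB "nwg-shell") ∧
  (PySem.Set.contains sA "errornointernet/packages" = PySem.Set.contains sB "wallust")

def pvStR (x : List (List (String × String)) × PySem.Set String) (s : PySem.Set String) : Prop :=
  x.1 = s.map infoDictB ∧ pvSeenR x.2 s

lemma pvStep_pres (pkg : String) (x : List (List (String × String)) × PySem.Set String)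
    (s : PySem.Set String) (h : pvStR x s) : pvStR (coprScanA x pkg) (pvStepB s pkg) := by
  obtain ⟨x1, sA⟩ := x
  obtain ⟨h1, r1, r2, r3, r4⟩ := h
  dsimp at h1
  subst h1
  by_cases e1 : pkg = "hyprland"
  · subst e1; constructor <;>
      simp [coprScanA, pvStepB, coprReposA, pkgToCoprB_items, PySem.Dict.get?_mk_cons,
        pvSeenR, infoDictB, coprReposB, PySem.Dict.get?, PySem.Set.add, PySem.Set.contains,
        r1, r2, r3, r4] <;> split_ifs <;> (try simp_all) <;> (try decide)
  · by_cases e2 : pkg = "hyprlock"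
    · subst e2; constructor <;>
        simp [coprScanA, pvStepB, coprReposA, pkgToCoprB_items, PySem.Dict.get?_mk_cons,
          pvSeenR, infoDictB, coprReposB, PySem.Dict.get?, PySem.Set.add, PySem.Set.contains,
          r1, r2, r3, r4] <;> split_ifs <;> (try simp_all) <;> (try decide)
    · by_cases e3 : pkg = "hypridle"
      · subst e3; constructor <;>
          simp [coprScanA, pvStepB, coprReposA, pkgToCoprB_items, PySem.Dict.get?_mk_cons,
            pvSeenR, infoDictB, coprReposB, PySem.Dict.get?, PySem.Set.add, PySem.Set.contains,
            r1, r2, r3, r4] <;> split_ifs <;> (try simp_all) <;> (try decide)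
      · by_cases e4 : pkg = "hyprpaper"
        · subst e4; constructor <;>
            simp [coprScanA, pvStepB, coprReposA, pkgToCoprB_items, PySem.Dict.get?_mk_cons,
              pvSeenR, infoDictB, coprReposB, PySem.Dict.get?, PySem.Set.add, PySem.Set.contains,
              r1, r2, r3, r4] <;> split_ifs <;> (try simp_all) <;> (try decide)
        · by_cases e5 : pkg = "hyprsunset"
          · subst e5; constructor <;>
              simp [coprScanA, pvStepB, coprReposA, pkgToCoprB_items, PySem.Dict.get?_mk_cons,
                pvSeenR, infoDictB, coprReposB, PySem.Dict.get?, PySem.Set.add, PySem.Set.contains,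
                r1, r2, r3, r4] <;> split_ifs <;> (try simp_all) <;> (try decide)
          · by_cases e6 : pkg = "hyprpolkitagent"
            · subst e6; constructor <;>
                simp [coprScanA, pvStepB, coprReposA, pkgToCoprB_items, PySem.Dict.get?_mk_cons,
                  pvSeenR, infoDictB, coprReposB, PySem.Dict.get?, PySem.Set.add, PySem.Set.contains,
                  r1, r2, r3, r4] <;> split_ifs <;> (try simp_all) <;> (try decide)
            · by_cases e7 : pkg = "swaync"
              · subst e7; constructor <;>
                  simp [coprScanA, pvStepB, coprReposA, pkgToCoprB_items, PySem.Dict.get?_mk_cons,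
                    pvSeenR, infoDictB, coprReposB, PySem.Dict.get?, PySem.Set.add, PySem.Set.contains,
                    r1, r2, r3, r4] <;> split_ifs <;> (try simp_all) <;> (try decide)
              · by_cases e8 : pkg = "nwg-displays"
                · subst e8; constructor <;>
                    simp [coprScanA, pvStepB, coprReposA, pkgToCoprB_items, PySem.Dict.get?_mk_cons,
                      pvSeenR, infoDictB, coprReposB, PySem.Dict.get?, PySem.Set.add, PySem.Set.contains,
                      r1, r2, r3, r4] <;> split_ifs <;> (try simp_all) <;> (try decide)
                · by_cases e9 : pkg = "nwg-look"
                  · subst e9; constructor <;>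
                      simp [coprScanA, pvStepB, coprReposA, pkgToCoprB_items, PySem.Dict.get?_mk_cons,
                        pvSeenR, infoDictB, coprReposB, PySem.Dict.get?, PySem.Set.add, PySem.Set.contains,
                        r1, r2, r3, r4] <;> split_ifs <;> (try simp_all) <;> (try decide)
                  · by_cases e10 : pkg = "wallust"
                    · subst e10; constructor <;>
                        simp [coprScanA, pvStepB, coprReposA, pkgToCoprB_items, PySem.Dict.get?_mk_cons,
                          pvSeenR, infoDictB, coprReposB, PySem.Dict.get?, PySem.Set.add, PySem.Set.contains,
                          r1, r2, r3, r4] <;> split_ifs <;> (try simp_all) <;> (try decide)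
                    · -- pkg matches no repo: both steps leave the state unchanged
                      have hB : pvStepB s pkg = s := by
                        simp [pvStepB, pvIndex_none pkg e1 e2 e3 e4 e5 e6 e7 e8 e9 e10]
                      have hA : coprScanA (s.map infoDictB, sA) pkg = (s.map infoDictB, sA) := by
                        simp [coprScanA, coprReposA, List.contains_cons,
                          e1, e2, e3, e4, e5, e6, e7, e8, e9, e10]
                      rw [hA, hB]
                      exact ⟨rfl, r1, r2, r3, r4⟩

lemma pvFold_pres (l : List String) (x : List (List (String × String)) × PySem.Set String)
    (s : PySem.Set String) (h : pvStR x s) : pvStR (l.foldl coprScanA x) (l.foldl pvStepB s) := by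
  induction l generalizing x s with
  | nil => exact h
  | cons hd tl ih =>
    rw [List.foldl_cons, List.foldl_cons]
    exact ih _ _ (pvStep_pres hd x s h)

-- ===== VERDICT (by name: the statement is the Claim_ definition above) =====
theorem get_required_coprs_for_packages_spec : Claim_equal_get_required_coprs_for_packages := by
  intro packages _
  unfold Spec_get_required_coprs_for_packages
  unfold get_required_coprs_for_packages get_required_coprs_for_packages_alt
  rw [PySem.List.dedup_eq_ofList, ← PySem.Set.update_nil_left, pvDedup_filterMap]
  exact (pvFold_pres packages ([], PySem.Set.empty) [] ⟨rfl, rfl, rfl, rfl, rfl⟩).1
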